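-- pv_equiv track=rewrite | github.com/ellietoulabi/Fn_ActiveInference | agents/ActiveInference/maths.py | flat_idx_to_state_indices
-- ===== SOURCE A (Python) =====
-- def flat_idx_to_state_indices(flat_idx, state_factors, state_sizes):
--     """
--     Convert flat joint state index to dict of factor indices.
--
--     Args:
--         flat_idx: flat index into joint state space
--         state_factors: list of factor names (defines order)
--         state_sizes: dict mapping factor names to sizes
--
--     Returns:
--         state_indices: dict mapping factor names to indices
--
--     Examples
--     --------
--     >>> state_factors = ['agent_pos', 'button_state']
--     >>> state_sizes = {'agent_pos': 9, 'button_state': 2}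
--     >>> flat_idx_to_state_indices(15, state_factors, state_sizes)
--     {'agent_pos': 7, 'button_state': 1}  # 15 = 7*2 + 1
--     """
--     state_indices = {}
--     remaining = flat_idx
--
--     # Process factors in reverse order (like unraveling multi-dimensional index)
--     for factor in reversed(state_factors):
--         size = state_sizes[factor]
--         state_indices[factor] = remaining % size
--         remaining = remaining // size
--
--     return state_indices
-- ===== SOURCE B (Python) =====
-- def flat_idx_to_state_indices(flat_idx, state_factors, state_sizes):
--     # Precompute each factor's place value (product of the sizes of all later
--     # factors), then read every digit independently from flat_idx: no running
--     # remainder is threaded through the loop.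
--     places = []
--     p = 1
--     for factor in reversed(state_factors):
--         places.append(p)
--         p *= state_sizes[factor]
--     state_indices = {}
--     for factor, place in zip(reversed(state_factors), places):
--         state_indices[factor] = (flat_idx // place) % state_sizes[factor]
--     return state_indices
-- ===== Notes on version B (the rewrite author's own statement) =====
-- stated objective: alternative
-- what changed: A threads a running remainder through a reverse loop (remaining % size, remaining //= size); B precomputes each factor's place value (suffix product of later sizes) in one pass and then extracts every digit independently as (flat_idx // place) % size, with no accumulator linking the digits.
-- outside the precondition, e.g. on flat_idx_to_state_indices(3, ['a', 'a', 'a'], {'a': -2}): A returns {'a': -1}, B returns {'a': 0}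
import Mathlib
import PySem

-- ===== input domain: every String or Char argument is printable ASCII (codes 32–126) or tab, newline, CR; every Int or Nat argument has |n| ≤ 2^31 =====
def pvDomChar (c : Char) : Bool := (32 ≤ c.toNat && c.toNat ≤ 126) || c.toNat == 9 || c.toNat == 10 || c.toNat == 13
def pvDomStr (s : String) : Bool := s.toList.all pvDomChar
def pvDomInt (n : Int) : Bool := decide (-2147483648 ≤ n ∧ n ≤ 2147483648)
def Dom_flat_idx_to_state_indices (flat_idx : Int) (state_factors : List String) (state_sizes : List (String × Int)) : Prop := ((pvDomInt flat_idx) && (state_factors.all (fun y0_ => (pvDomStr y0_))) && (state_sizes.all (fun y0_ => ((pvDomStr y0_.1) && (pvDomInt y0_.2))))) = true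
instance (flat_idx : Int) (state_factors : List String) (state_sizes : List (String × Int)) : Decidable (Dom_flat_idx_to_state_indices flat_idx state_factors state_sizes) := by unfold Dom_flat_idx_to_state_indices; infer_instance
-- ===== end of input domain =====

-- B replaces A's remainder-threading reverse loop by a precomputed place-value table plus
-- independent digit extraction (alternative decomposition, same asymptotic cost).


-- ===== PORT A =====
-- A: loop over reversed factors threading the remaining index through % / //.
def flat_idx_to_state_indices (flat_idx : Int) (state_factors : List String) (state_sizes : List (String × Int)) : List (String × Int) :=
  (state_factors.reverse.foldl
    (fun (st : PySem.Dict String Int × Int) factor =>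
      let size := (PySem.Dict.mk state_sizes).getD factor 0
      (st.1.insert factor (PySem.Int.mod st.2 size), PySem.Int.floordiv st.2 size))
    (PySem.Dict.empty, flat_idx)).1.items

-- ===== PORT B =====
-- B: first build the place values (suffix products), then set each digit independently.
def flat_idx_to_state_indices_alt (flat_idx : Int) (state_factors : List String) (state_sizes : List (String × Int)) : List (String × Int) :=
  let places := (state_factors.reverse.foldl
    (fun (st : List Int × Int) factor =>
      (st.1 ++ [st.2], st.2 * (PySem.Dict.mk state_sizes).getD factor 0))
    ([], 1)).1
  ((state_factors.reverse.zip places).foldl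
    (fun (d : PySem.Dict String Int) fp =>
      d.insert fp.1 (PySem.Int.mod (PySem.Int.floordiv flat_idx fp.2)
        ((PySem.Dict.mk state_sizes).getD fp.1 0)))
    PySem.Dict.empty).items

-- ===== PRECONDITION & SPEC =====
-- Pre_ excludes factors missing from state_sizes (A raises KeyError) and sizes = 0 (A raises
-- ZeroDivisionError); it also excludes negative sizes, a nonsensical corner on which A's
-- sequential remainders and B's independent digits are both defensible and neither is specified.
def Pre_flat_idx_to_state_indices (flat_idx : Int) (state_factors : List String) (state_sizes : List (String × Int)) : Prop :=
  ∀ f ∈ state_factors, 1 ≤ (PySem.Dict.mk state_sizes).getD f 0 ∧ (PySem.Dict.mk state_sizes).contains f = true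
instance (flat_idx : Int) (state_factors : List String) (state_sizes : List (String × Int)) : Decidable (Pre_flat_idx_to_state_indices flat_idx state_factors state_sizes) := by unfold Pre_flat_idx_to_state_indices; infer_instance
def pvWitness_flat_idx_to_state_indices : Int × List String × (List (String × Int)) :=
  (15, ["agent_pos", "button_state"], [("agent_pos", 9), ("button_state", 2)])

def Spec_flat_idx_to_state_indices (flat_idx : Int) (state_factors : List String) (state_sizes : List (String × Int)) (out : List (String × Int)) : Prop := out = flat_idx_to_state_indices_alt flat_idx state_factors state_sizes
instance (flat_idx : Int) (state_factors : List String) (state_sizes : List (String × Int)) (out : List (String × Int)) : Decidable (Spec_flat_idx_to_state_indices flat_idx state_factors state_sizes out) := by unfold Spec_flat_idx_to_state_indices; infer_instance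

-- ===== CLAIM (what is proved, stated in full; the proofs are below) =====
def Claim_equal_flat_idx_to_state_indices : Prop := ∀ (flat_idx : Int) (state_factors : List String) (state_sizes : List (String × Int)), Dom_flat_idx_to_state_indices flat_idx state_factors state_sizes → Pre_flat_idx_to_state_indices flat_idx state_factors state_sizes → Spec_flat_idx_to_state_indices flat_idx state_factors state_sizes (flat_idx_to_state_indices flat_idx state_factors state_sizes)

-- ===== LEMMAS AND PROOFS =====

-- the place values B's first loop produces: p, p*sz f0, p*sz f0*sz f1, …
def pvScanPlaces (sz : String → Int) : List String → Int → List Int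
  | [], _ => []
  | f :: rest, p => p :: pvScanPlaces sz rest (p * sz f)

theorem pvPlacesFold (sz : String → Int) :
    ∀ (m : List String) (acc : List Int) (p : Int),
      (m.foldl (fun (st : List Int × Int) f => (st.1 ++ [st.2], st.2 * sz f)) (acc, p)).1
        = acc ++ pvScanPlaces sz m p := by
  intro m
  induction m with
  | nil => intro acc p; simp [pvScanPlaces]
  | cons f rest ih =>
    intro acc p
    simp only [List.foldl_cons, pvScanPlaces]
    rw [ih]
    simp

theorem pvFloordivFloordiv (x p s : Int) (hp : 1 ≤ p) (hs : 1 ≤ s) :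
    PySem.Int.floordiv (PySem.Int.floordiv x p) s = PySem.Int.floordiv x (p * s) := by
  rw [PySem.Int.floordiv_eq_ediv_of_pos (by omega),
      PySem.Int.floordiv_eq_ediv_of_pos (by omega),
      PySem.Int.floordiv_eq_ediv_of_pos (by nlinarith)]
  exact Int.ediv_ediv_of_nonneg (by omega)

theorem pvMain (sz : String → Int) :
    ∀ (m : List String) (d : PySem.Dict String Int) (x p : Int),
      1 ≤ p → (∀ f ∈ m, 1 ≤ sz f) →
      (m.foldl
        (fun (st : PySem.Dict String Int × Int) f =>
          (st.1.insert f (PySem.Int.mod st.2 (sz f)), PySem.Int.floordiv st.2 (sz f)))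
        (d, PySem.Int.floordiv x p)).1
      = ((m.zip (pvScanPlaces sz m p)).foldl
          (fun (d : PySem.Dict String Int) fp =>
            d.insert fp.1 (PySem.Int.mod (PySem.Int.floordiv x fp.2) (sz fp.1))) d) := by
  intro m
  induction m with
  | nil => intro d x p _ _; simp
  | cons f rest ih =>
    intro d x p hp hsz
    have hf : 1 ≤ sz f := hsz f (by simp)
    simp only [pvScanPlaces, List.zip_cons_cons, List.foldl_cons]
    rw [pvFloordivFloordiv x p (sz f) hp hf]
    exact ih _ x (p * (sz f)) (by nlinarith) (fun g hg => hsz g (by simp [hg]))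

theorem pvFloordivOne (x : Int) : PySem.Int.floordiv x 1 = x := by
  rw [PySem.Int.floordiv_eq_ediv_of_pos (by omega)]; exact Int.ediv_one x

-- ===== VERDICT (by name: the statement is the Claim_ definition above) =====
theorem flat_idx_to_state_indices_spec : Claim_equal_flat_idx_to_state_indices := by
  intro flat_idx state_factors state_sizes _ hpre
  unfold Spec_flat_idx_to_state_indices
  unfold flat_idx_to_state_indices flat_idx_to_state_indices_alt
  rw [pvPlacesFold (fun f => (PySem.Dict.mk state_sizes).getD f 0) state_factors.reverse [] 1]
  simp only [List.nil_append]
  rw [← pvMain (fun f => (PySem.Dict.mk state_sizes).getD f 0) state_factors.reverse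
        PySem.Dict.empty flat_idx 1 (by omega)
        (fun g hg => ((hpre g (List.mem_reverse.mp hg)).1))]
  rw [pvFloordivOne]
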